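-- pv_equiv track=rewrite | github.com/ChenshuXu/Foundations-of-Artificial-Intelligence | little go game/myplayer_play/QLearner/s1_submit/cnt5/GameBoard.py | count_liberty
-- ===== SOURCE A (Python) =====
-- def detect_neighbor(board, i, j):
--     """
--     Detect all the neighbors of a given stone.
--
--     :param i: row number of the board.
--     :param j: column number of the board.
--     :return: a list containing the neighbors row and column (row, column) of position (i, j).
--     """
--     neighbors = []
--     # Detect borders and add neighbor coordinates
--     if i > 0:
--         neighbors.append((i - 1, j))
--     if i < 4:
--         neighbors.append((i + 1, j))
--     if j > 0:
--         neighbors.append((i, j - 1))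
--     if j < 4:
--         neighbors.append((i, j + 1))
--     return neighbors
--
-- def count_liberty(board, piece_type):
--     """
--     Count how many liberty of a given piece type
--
--     :param board: the game board
--     :param piece_type: 1('X') or 2('O')
--     :return: size of liberty
--     """
--     count = 0
--     all_neighbors = set()
--     for i in range(5):
--         for j in range(5):
--             if board[i][j] == piece_type:
--                 # check 4 directions, see if have liberty
--                 neighbors = detect_neighbor(board, i, j)
--                 for nei in neighbors:
--                     all_neighbors.add(nei)
--     for nei_i, nei_j in all_neighbors:
--         if board[nei_i][nei_j] == 0:
--             count += 1
--     return count
-- ===== SOURCE B (Python) =====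
-- def count_liberty(board, piece_type):
--     # A liberty is an empty cell adjacent to a stone of the given type; count
--     # them directly with one comprehension over the 25 cells, using the four
--     # direction offsets with an inline bounds check (no neighbor helper, no set).
--     deltas = ((-1, 0), (1, 0), (0, -1), (0, 1))
--     return sum(
--         1
--         for i in range(5)
--         for j in range(5)
--         if board[i][j] == 0
--         and any(
--             0 <= i + di < 5 and 0 <= j + dj < 5 and board[i + di][j + dj] == piece_type
--             for di, dj in deltas
--         )
--     )
-- ===== Notes on version B (the rewrite author's own statement) =====
-- stated objective: simpler
-- what changed: Instead of collecting every neighbor of the piece's stones into a set and then counting the empty ones, B counts in one comprehension the empty cells that have an in-bounds delta-offset neighbor equal to the piece type (adjacency symmetry makes the totals equal); the neighbor-list helper and the set accumulator disappear.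
import Mathlib
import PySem

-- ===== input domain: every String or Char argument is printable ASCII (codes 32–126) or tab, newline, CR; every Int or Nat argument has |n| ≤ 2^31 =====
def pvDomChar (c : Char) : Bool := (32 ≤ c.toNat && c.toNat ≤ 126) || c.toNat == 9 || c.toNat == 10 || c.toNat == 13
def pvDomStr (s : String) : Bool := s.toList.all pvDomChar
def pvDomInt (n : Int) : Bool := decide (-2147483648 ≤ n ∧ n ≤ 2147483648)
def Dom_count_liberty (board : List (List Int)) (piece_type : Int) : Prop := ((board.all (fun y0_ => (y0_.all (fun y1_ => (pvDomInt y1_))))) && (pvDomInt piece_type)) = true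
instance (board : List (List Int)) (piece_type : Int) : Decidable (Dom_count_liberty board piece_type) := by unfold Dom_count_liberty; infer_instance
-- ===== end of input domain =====

-- B replaces A's "collect piece neighbors into a set, then count empties" by one
-- comprehension counting empty cells with an in-bounds offset neighbor of the piece
-- type (simpler: no neighbor helper, no set).


-- ===== PORT A =====
def detect_neighbor (board : List (List Int)) (i j : Int) : List (Int × Int) :=
  let neighbors : List (Int × Int) := []
  let neighbors := if i > 0 then neighbors ++ [(i - 1, j)] else neighbors
  let neighbors := if i < 4 then neighbors ++ [(i + 1, j)] else neighbors
  let neighbors := if j > 0 then neighbors ++ [(i, j - 1)] else neighbors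
  let neighbors := if j < 4 then neighbors ++ [(i, j + 1)] else neighbors
  neighbors

-- board[i][j]; exact under Pre_ (indices 0..4 in range, so no IndexError)
def pvCell (board : List (List Int)) (i j : Int) : Int :=
  PySem.List.pyGetD (PySem.List.pyGetD board i []) j 0

def count_liberty (board : List (List Int)) (piece_type : Int) : Int :=
  let all_neighbors : PySem.Set (Int × Int) := PySem.Set.empty
  let all_neighbors := (PySem.List.pyRange 0 5 1).foldl (fun s i =>
      (PySem.List.pyRange 0 5 1).foldl (fun s j =>
        if pvCell board i j = piece_type then
          (detect_neighbor board i j).foldl (fun s nei => PySem.Set.add s nei) s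
        else s) s) all_neighbors
  -- iteration over the set: the count does not depend on iteration order
  all_neighbors.foldl (fun count nei =>
    if pvCell board nei.1 nei.2 = 0 then count + 1 else count) 0

-- ===== PORT B =====
def pvDeltas : List (Int × Int) := [(-1, 0), (1, 0), (0, -1), (0, 1)]

-- the comprehension `sum(1 for i … for j … if cond)` as a flat list of 1s, summed
def count_liberty_alt (board : List (List Int)) (piece_type : Int) : Int :=
  ((PySem.List.pyRange 0 5 1).flatMap (fun i =>
    (PySem.List.pyRange 0 5 1).flatMap (fun j =>
      if pvCell board i j = 0 ∧ pvDeltas.any (fun d =>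
          decide (0 ≤ i + d.1 ∧ i + d.1 < 5 ∧ 0 ≤ j + d.2 ∧ j + d.2 < 5) &&
          (pvCell board (i + d.1) (j + d.2) == piece_type))
      then [(1 : Int)] else []))).sum

-- ===== PRECONDITION & SPEC =====
-- A indexes board[i][j] for 0 ≤ i,j ≤ 4; it raises IndexError on anything smaller.
def Pre_count_liberty (board : List (List Int)) (piece_type : Int) : Prop :=
  5 ≤ board.length ∧ ∀ row ∈ board.take 5, 5 ≤ row.length
instance (board : List (List Int)) (piece_type : Int) : Decidable (Pre_count_liberty board piece_type) := by unfold Pre_count_liberty; infer_instance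

def pvWitness_count_liberty : List (List Int) × Int :=
  ([[0,1,0,0,0],[2,0,0,0,0],[0,0,0,0,0],[0,0,0,0,0],[0,0,0,0,1]], 1)

def Spec_count_liberty (board : List (List Int)) (piece_type : Int) (out : Int) : Prop := out = count_liberty_alt board piece_type
instance (board : List (List Int)) (piece_type : Int) (out : Int) : Decidable (Spec_count_liberty board piece_type out) := by unfold Spec_count_liberty; infer_instance

-- ===== CLAIM (what is proved, stated in full; the proofs are below) =====
def Claim_equal_count_liberty : Prop := ∀ (board : List (List Int)) (piece_type : Int), Dom_count_liberty board piece_type → Pre_count_liberty board piece_type → Spec_count_liberty board piece_type (count_liberty board piece_type)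

-- ===== LEMMAS AND PROOFS =====

def pvR5 : List Int := PySem.List.pyRange 0 5 1
def pvGrid : List (Int × Int) := pvR5.flatMap (fun i => pvR5.map (fun j => (i, j)))

-- B's per-cell condition, named for the proofs
abbrev pvBCond (board : List (List Int)) (t : Int) (p : Int × Int) : Prop :=
  pvCell board p.1 p.2 = 0 ∧ pvDeltas.any (fun d =>
    decide (0 ≤ p.1 + d.1 ∧ p.1 + d.1 < 5 ∧ 0 ≤ p.2 + d.2 ∧ p.2 + d.2 < 5) &&
    (pvCell board (p.1 + d.1) (p.2 + d.2) == t))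

theorem detect_indep (board board' : List (List Int)) (i j : Int) :
    detect_neighbor board i j = detect_neighbor board' i j := rfl

-- generic membership characterisation of a fold
theorem mem_foldl_gen {α β : Type} (step : List β → α → List β) (Q : α → β → Prop)
    (h : ∀ s x p, p ∈ step s x ↔ p ∈ s ∨ Q x p) :
    ∀ (xs : List α) (s : List β) (p : β), p ∈ xs.foldl step s ↔ p ∈ s ∨ ∃ x ∈ xs, Q x p := by
  intro xs
  induction xs with
  | nil => simp
  | cons a l ih =>
    intro s p
    simp only [List.foldl_cons, ih, h, List.mem_cons]
    constructor
    · rintro ((hs | hq) | ⟨x, hx, hq⟩)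
      · exact Or.inl hs
      · exact Or.inr ⟨a, Or.inl rfl, hq⟩
      · exact Or.inr ⟨x, Or.inr hx, hq⟩
    · rintro (hs | ⟨x, (rfl | hx), hq⟩)
      · exact Or.inl (Or.inl hs)
      · exact Or.inl (Or.inr hq)
      · exact Or.inr ⟨x, hx, hq⟩

-- generic nodup preservation of a fold
theorem nodup_foldl_gen {α β : Type} (step : List β → α → List β)
    (h : ∀ s x, s.Nodup → (step s x).Nodup) :
    ∀ (xs : List α) (s : List β), s.Nodup → (xs.foldl step s).Nodup := by
  intro xs
  induction xs with
  | nil => simpa using fun s hs => hs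
  | cons a l ih => intro s hs; exact ih _ (h s a hs)

theorem mem_foldl_add (l : List (Int × Int)) (s : List (Int × Int)) (p : Int × Int) :
    p ∈ l.foldl PySem.Set.add s ↔ p ∈ s ∨ p ∈ l := by
  simpa using mem_foldl_gen PySem.Set.add (fun x p => p = x)
    (fun s x p => PySem.Set.mem_add s x p) l s p

-- membership in A's accumulated set
theorem mem_A_set (board : List (List Int)) (t : Int) (p : Int × Int) :
    p ∈ (PySem.List.pyRange 0 5 1).foldl (fun s i =>
        (PySem.List.pyRange 0 5 1).foldl (fun s j =>
          if pvCell board i j = t then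
            (detect_neighbor board i j).foldl (fun s nei => PySem.Set.add s nei) s
          else s) s) (PySem.Set.empty : PySem.Set (Int × Int)) ↔
      ∃ q ∈ pvGrid, pvCell board q.1 q.2 = t ∧ p ∈ detect_neighbor board q.1 q.2 := by
  have hin : ∀ (i : Int) (s : List (Int × Int)) (j : Int) (p : Int × Int),
      p ∈ (if pvCell board i j = t then
            (detect_neighbor board i j).foldl (fun s nei => PySem.Set.add s nei) s
          else s) ↔ p ∈ s ∨ (pvCell board i j = t ∧ p ∈ detect_neighbor board i j) := by
    intro i s j p
    split_ifs with h
    · simp [mem_foldl_add, h]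
    · simp [h]
  have houter := mem_foldl_gen
    (fun s i => (PySem.List.pyRange 0 5 1).foldl (fun s j =>
        if pvCell board i j = t then
          (detect_neighbor board i j).foldl (fun s nei => PySem.Set.add s nei) s
        else s) s)
    (fun i p => ∃ j ∈ PySem.List.pyRange 0 5 1, pvCell board i j = t ∧ p ∈ detect_neighbor board i j)
    (fun s i p => mem_foldl_gen _ _ (hin i) (PySem.List.pyRange 0 5 1) s p)
    (PySem.List.pyRange 0 5 1) PySem.Set.empty p
  refine houter.trans ?_
  constructor
  · rintro (h0 | ⟨i, hi, j, hj, hc, hp⟩)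
    · simp [PySem.Set.empty] at h0
    · exact ⟨(i, j), by
        simp only [pvGrid, pvR5, List.mem_flatMap, List.mem_map]
        exact ⟨i, hi, j, hj, rfl⟩, hc, hp⟩
  · rintro ⟨q, hq, hc, hp⟩
    right
    simp only [pvGrid, pvR5, List.mem_flatMap, List.mem_map] at hq
    obtain ⟨i', hi', j', hj', he⟩ := hq
    subst he
    exact ⟨i', hi', j', hj', hc, hp⟩

theorem nodup_A_set (board : List (List Int)) (t : Int) :
    ((PySem.List.pyRange 0 5 1).foldl (fun s i =>
        (PySem.List.pyRange 0 5 1).foldl (fun s j =>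
          if pvCell board i j = t then
            (detect_neighbor board i j).foldl (fun s nei => PySem.Set.add s nei) s
          else s) s) (PySem.Set.empty : PySem.Set (Int × Int))).Nodup := by
  apply nodup_foldl_gen
  · intro s i hs
    apply nodup_foldl_gen
    · intro s j hs
      split_ifs
      · exact nodup_foldl_gen _ (fun s x hs => PySem.Set.nodup_add s x hs) _ _ hs
      · exact hs
    · exact hs
  · simp [PySem.Set.empty]

-- neighbour symmetry on the 5×5 grid (closed statement: board is irrelevant)
theorem nbr_sym_dec :
    (pvGrid.all (fun q => (detect_neighbor [] q.1 q.2).all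
      (fun p => decide (p ∈ pvGrid) && decide (q ∈ detect_neighbor [] p.1 p.2)))) = true := by
  decide

theorem nbr_sym (board : List (List Int)) (q p : Int × Int) (hq : q ∈ pvGrid)
    (hp : p ∈ detect_neighbor board q.1 q.2) :
    p ∈ pvGrid ∧ q ∈ detect_neighbor board p.1 p.2 := by
  have h := List.all_eq_true.mp nbr_sym_dec q hq
  rw [detect_indep board ([])] at hp
  have h2 := List.all_eq_true.mp h p hp
  rw [detect_indep board ([])]
  simpa using h2

-- on the grid, detect_neighbor is exactly the in-bounds delta offsets (closed fact)
theorem nbr_deltas_dec :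
    (pvGrid.all (fun p => detect_neighbor [] p.1 p.2 ==
      (pvDeltas.filter (fun d =>
        decide (0 ≤ p.1 + d.1 ∧ p.1 + d.1 < 5 ∧ 0 ≤ p.2 + d.2 ∧ p.2 + d.2 < 5))).map
        (fun d => (p.1 + d.1, p.2 + d.2)))) = true := by
  decide

-- B's delta-any condition ↔ "some neighbor holds the piece", for grid points
theorem bcond_iff (board : List (List Int)) (t : Int) (p : Int × Int) (hp : p ∈ pvGrid) :
    pvBCond board t p ↔
      (pvCell board p.1 p.2 = 0 ∧ ∃ q ∈ detect_neighbor board p.1 p.2, pvCell board q.1 q.2 = t) := by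
  have he := eq_of_beq (List.all_eq_true.mp nbr_deltas_dec p hp)
  unfold pvBCond
  rw [detect_indep board ([]), he]
  simp only [List.any_eq_true, List.mem_map, List.mem_filter, Bool.and_eq_true,
    decide_eq_true_eq, beq_iff_eq]
  constructor
  · rintro ⟨h0, d, hd, hb, hc⟩
    exact ⟨h0, (p.1 + d.1, p.2 + d.2), ⟨d, ⟨hd, hb⟩, rfl⟩, hc⟩
  · rintro ⟨h0, q, ⟨d, ⟨hd, hb⟩, hq⟩, hc⟩
    subst hq
    exact ⟨h0, d, hd, hb, hc⟩

-- the two characterisations of a liberty coincide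
theorem liberty_iff (board : List (List Int)) (t : Int) (p : Int × Int) :
    (∃ q ∈ pvGrid, pvCell board q.1 q.2 = t ∧ p ∈ detect_neighbor board q.1 q.2) ↔
      (p ∈ pvGrid ∧ ∃ q ∈ detect_neighbor board p.1 p.2, pvCell board q.1 q.2 = t) := by
  constructor
  · rintro ⟨q, hq, hc, hp⟩
    obtain ⟨hpg, hqn⟩ := nbr_sym board q p hq hp
    exact ⟨hpg, q, hqn, hc⟩
  · rintro ⟨hpg, q, hq, hc⟩
    obtain ⟨hqg, hpn⟩ := nbr_sym board p q hpg hq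
    exact ⟨q, hqg, hc, hpn⟩

-- fold-counting lemma for A's final loop
theorem foldl_count {α : Type} (P : α → Prop) [DecidablePred P] :
    ∀ (l : List α) (n : Int),
      l.foldl (fun c x => if P x then c + 1 else c) n = n + (l.countP (fun x => decide (P x)) : Int) := by
  intro l
  induction l with
  | nil => simp
  | cons a l ih =>
    intro n
    simp only [List.foldl_cons, List.countP_cons, ih]
    by_cases h : P a <;> simp [h] <;> push_cast <;> ring

-- sum of the list of 1s produced by a guarded comprehension = count of hits
theorem sum_ones_count {α : Type} (P : α → Prop) [DecidablePred P] :
    ∀ (l : List α),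
      (l.flatMap (fun x => if P x then [(1 : Int)] else [])).sum
        = (l.countP (fun x => decide (P x)) : Int) := by
  intro l
  induction l with
  | nil => simp
  | cons a l ih =>
    simp only [List.flatMap_cons, List.sum_append, List.countP_cons, ih]
    by_cases h : P a <;> simp [h] <;> push_cast <;> ring

-- B as a count over the grid
theorem B_eq_countP (board : List (List Int)) (t : Int) :
    count_liberty_alt board t = (pvGrid.countP (fun p => decide (pvBCond board t p)) : Int) := by
  unfold count_liberty_alt
  have hflat : (PySem.List.pyRange 0 5 1).flatMap (fun i =>
      (PySem.List.pyRange 0 5 1).flatMap (fun j =>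
        if pvCell board i j = 0 ∧ pvDeltas.any (fun d =>
            decide (0 ≤ i + d.1 ∧ i + d.1 < 5 ∧ 0 ≤ j + d.2 ∧ j + d.2 < 5) &&
            (pvCell board (i + d.1) (j + d.2) == t))
        then [(1 : Int)] else []))
      = pvGrid.flatMap (fun p => if pvBCond board t p then [(1 : Int)] else []) := by
    simp only [pvGrid, pvR5, List.flatMap_assoc, List.flatMap_map]
  rw [hflat, sum_ones_count]

-- ===== VERDICT (by name: the statement is the Claim_ definition above) =====
theorem count_liberty_spec : Claim_equal_count_liberty := by
  intro board t _ _
  unfold Spec_count_liberty count_liberty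
  simp only []
  set S := (PySem.List.pyRange 0 5 1).foldl (fun s i =>
      (PySem.List.pyRange 0 5 1).foldl (fun s j =>
        if pvCell board i j = t then
          (detect_neighbor board i j).foldl (fun s nei => PySem.Set.add s nei) s
        else s) s) (PySem.Set.empty : PySem.Set (Int × Int)) with hS
  rw [B_eq_countP]
  have hA : S.foldl (fun count nei => if pvCell board nei.1 nei.2 = 0 then count + 1 else count) 0
      = (S.countP (fun p => decide (pvCell board p.1 p.2 = 0)) : Int) := by
    simpa using foldl_count (fun p : Int × Int => pvCell board p.1 p.2 = 0) S 0
  rw [hA]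
  congr 1
  -- count over S of "empty" = count over grid of B's condition
  rw [List.countP_eq_length_filter, List.countP_eq_length_filter]
  have hperm : List.Perm (S.filter (fun p => decide (pvCell board p.1 p.2 = 0)))
      (pvGrid.filter (fun p => decide (pvBCond board t p))) := by
    rw [List.perm_ext_iff_of_nodup (List.Nodup.filter _ (nodup_A_set board t))
      (List.Nodup.filter _ (by decide : pvGrid.Nodup))]
    intro p
    simp only [List.mem_filter, decide_eq_true_eq, mem_A_set]
    constructor
    · rintro ⟨hmem, he⟩
      obtain ⟨hpg, hnb⟩ := (liberty_iff board t p).mp hmem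
      exact ⟨hpg, (bcond_iff board t p hpg).mpr ⟨he, hnb⟩⟩
    · rintro ⟨hpg, hb⟩
      obtain ⟨he, hnb⟩ := (bcond_iff board t p hpg).mp hb
      exact ⟨(liberty_iff board t p).mpr ⟨hpg, hnb⟩, he⟩
  exact hperm.length_eq
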